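-- pv_equiv track=rewrite | github.com/Ashmit8583/plasmid-design-with-ori-detection_BBL434 | ori_finder.py | find_ori
-- ===== SOURCE A (Python) =====
-- def find_ori(sequence, window=500):
--     """
--     Finds origin of replication using GC skew analysis.
--     """
--
--     max_skew = float("-inf")
--     ori_index = 0
--
--     for i in range(0, len(sequence) - window, window):
--         window_seq = sequence[i:i+window]
--         g = window_seq.count("G")
--         c = window_seq.count("C")
--         skew = g - c
--
--         if skew > max_skew:
--             max_skew = skew
--             ori_index = i
--
--     return sequence[ori_index:ori_index + window]
-- ===== SOURCE B (Python) =====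
-- def find_ori(sequence, window=500):
--     """
--     Finds origin of replication using GC skew analysis.
--     Uses a prefix GC-skew table so each window's skew is a constant-time difference.
--     """
--     P = [0]
--     for ch in sequence:
--         P.append(P[-1] + (1 if ch == 'G' else -1 if ch == 'C' else 0))
--
--     max_skew = None
--     ori_index = 0
--     for i in range(0, len(sequence) - window, window):
--         skew = P[i + window] - P[i]
--         if max_skew is None or skew > max_skew:
--             max_skew = skew
--             ori_index = i
--
--     return sequence[ori_index:ori_index + window]
-- ===== Notes on version B (the rewrite author's own statement) =====
-- stated objective: alternative
-- what changed: B precomputes a prefix GC-skew table in one pass and obtains each window's skew as a constant-time difference of two table entries, instead of slicing each window and running two counts over it.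
import Mathlib
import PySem

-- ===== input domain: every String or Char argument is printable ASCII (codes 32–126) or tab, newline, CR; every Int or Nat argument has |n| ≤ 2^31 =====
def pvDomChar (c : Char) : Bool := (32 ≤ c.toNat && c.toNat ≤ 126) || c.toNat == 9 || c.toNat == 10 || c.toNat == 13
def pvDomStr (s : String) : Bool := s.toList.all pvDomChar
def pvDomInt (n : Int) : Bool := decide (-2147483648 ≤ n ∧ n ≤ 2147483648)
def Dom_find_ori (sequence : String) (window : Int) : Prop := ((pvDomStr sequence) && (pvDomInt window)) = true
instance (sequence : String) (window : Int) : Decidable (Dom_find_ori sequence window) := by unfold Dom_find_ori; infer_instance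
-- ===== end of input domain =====

-- B replaces A's per-window slice-and-count with a prefix GC-skew table and constant-time
-- window differences (alternative decomposition, same asymptotic cost).


-- ===== PORT A =====
-- max_skew = float("-inf") is modelled as Option Int: none = -inf (any int skew beats it).
-- window_seq.count("G") on a single-character pattern is exactly List.count of that char.
def find_ori (sequence : String) (window : Int) : String :=
  let cs := sequence.toList
  let st := (PySem.List.pyRange 0 ((cs.length : Int) - window) window).foldl
    (fun (st : Option Int × Int) i =>
      let window_seq := PySem.List.slice cs (some i) (some (i + window))
      let g : Int := window_seq.count 'G'
      let c : Int := window_seq.count 'C'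
      let skew := g - c
      match st.1 with
      | none => (some skew, i)
      | some m => if m < skew then (some skew, i) else st)
    (none, 0)
  String.ofList (PySem.List.slice cs (some st.2) (some (st.2 + window)))

-- ===== PORT B =====
-- P[-1] is PySem.List.pyGetD P (-1) 0; P[i] / P[i+window] are always in range inside the loop.
def find_ori_alt (sequence : String) (window : Int) : String :=
  let cs := sequence.toList
  let P := cs.foldl
    (fun (P : List Int) ch =>
      P ++ [PySem.List.pyGetD P (-1) 0 + (if ch = 'G' then (1 : Int) else if ch = 'C' then -1 else 0)])
    [0]
  let st := (PySem.List.pyRange 0 ((cs.length : Int) - window) window).foldl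
    (fun (st : Option Int × Int) i =>
      let skew := PySem.List.pyGetD P (i + window) 0 - PySem.List.pyGetD P i 0
      if (match st.1 with | none => true | some m => decide (m < skew)) then (some skew, i) else st)
    (none, 0)
  String.ofList (PySem.List.slice cs (some st.2) (some (st.2 + window)))

-- ===== PRECONDITION & SPEC =====
-- Pre_ excludes only window = 0, where A raises ValueError (range() with step 0).
def Pre_find_ori (sequence : String) (window : Int) : Prop := window ≠ 0
instance (sequence : String) (window : Int) : Decidable (Pre_find_ori sequence window) := by unfold Pre_find_ori; infer_instance
def pvWitness_find_ori : String × Int := ("GCATGGGCATCC", 4)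

def Spec_find_ori (sequence : String) (window : Int) (out : String) : Prop := out = find_ori_alt sequence window
instance (sequence : String) (window : Int) (out : String) : Decidable (Spec_find_ori sequence window out) := by unfold Spec_find_ori; infer_instance

-- ===== CLAIM (what is proved, stated in full; the proofs are below) =====
def Claim_equal_find_ori : Prop := ∀ (sequence : String) (window : Int), Dom_find_ori sequence window → Pre_find_ori sequence window → Spec_find_ori sequence window (find_ori sequence window)

-- ===== LEMMAS AND PROOFS =====

-- the per-character skew contribution
def pvF (ch : Char) : Int := if ch = 'G' then 1 else if ch = 'C' then -1 else 0

lemma pvSum_eq_counts (l : List Char) :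
    (l.map pvF).sum = (l.count 'G' : Int) - (l.count 'C' : Int) := by
  induction l with
  | nil => simp
  | cons c t ih =>
    simp only [List.map_cons, List.sum_cons, List.count_cons, ih, pvF]
    by_cases hg : c = 'G'
    · subst hg; simp; ring
    · by_cases hc : c = 'C'
      · subst hc; simp; ring
      · simp [hg, hc]

-- characterisation of B's prefix table built by the append loop
lemma pvP_eq (cs : List Char) (acc : List Int) (h : acc ≠ []) :
    cs.foldl (fun (P : List Int) ch => P ++ [PySem.List.pyGetD P (-1) 0 + pvF ch]) acc
      = acc ++ (List.range cs.length).map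
          (fun k => acc.getLast h + ((cs.take (k+1)).map pvF).sum) := by
  induction cs generalizing acc with
  | nil => simp
  | cons c t ih =>
    simp only [List.foldl_cons]
    have hlast : PySem.List.pyGetD acc (-1) 0 = acc.getLast h := by
      rcases List.exists_cons_of_ne_nil h with ⟨a, t', rfl⟩
      simp [PySem.List.pyGetD, PySem.List.pyGet?, PySem.List.pyIdx?, List.getLast_eq_getElem]
      rfl
    rw [hlast, ih (acc ++ [acc.getLast h + pvF c]) (by simp)]
    have hl : (acc ++ [acc.getLast h + pvF c]).getLast (by simp) = acc.getLast h + pvF c := by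
      simp
    rw [hl, List.append_assoc]
    congr 1
    rw [List.length_cons, List.range_succ_eq_map]
    simp only [List.map_cons, List.map_map, List.singleton_append]
    congr 1
    · simp
    · apply List.map_congr_left
      intro k _
      simp [List.take_succ_cons, Function.comp]
      ring

-- value of B's table at a natural index j ≤ n
lemma pvP_get (cs : List Char) (j : Nat) (hj : j ≤ cs.length) :
    PySem.List.pyGetD
      (cs.foldl (fun (P : List Int) ch => P ++ [PySem.List.pyGetD P (-1) 0 + pvF ch]) [0])
      (j : Int) 0 = ((cs.take j).map pvF).sum := by
  rw [pvP_eq cs [0] (by simp)]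
  rw [List.singleton_append, PySem.List.pyGetD_natCast]
  cases j with
  | zero => simp
  | succ m =>
    have hm : m < cs.length := by omega
    simp [List.getD_eq_getElem?_getD, hm]

lemma pvSkew_eq (cs : List Char) (window i : Int) (h0 : 0 ≤ i) (hw : 0 < window)
    (hub : i + window ≤ (cs.length : Int)) :
    PySem.List.pyGetD
        (cs.foldl (fun (P : List Int) ch => P ++ [PySem.List.pyGetD P (-1) 0 + pvF ch]) [0])
        (i + window) 0
      - PySem.List.pyGetD
        (cs.foldl (fun (P : List Int) ch => P ++ [PySem.List.pyGetD P (-1) 0 + pvF ch]) [0])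
        i 0
      = ((PySem.List.slice cs (some i) (some (i + window))).count 'G' : Int)
        - ((PySem.List.slice cs (some i) (some (i + window))).count 'C' : Int) := by
  rw [← pvSum_eq_counts]
  obtain ⟨a, rfl⟩ : ∃ a : Nat, i = (a : Int) := ⟨i.toNat, by omega⟩
  obtain ⟨b, rfl⟩ : ∃ b : Nat, window = (b : Int) := ⟨window.toNat, by omega⟩
  rw [PySem.List.slice_natCast_add]
  have hcast : (a : Int) + (b : Int) = ((a + b : Nat) : Int) := by push_cast; ring
  rw [hcast, pvP_get cs (a + b) (by omega), pvP_get cs a (by omega)]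
  rw [List.take_add, List.map_append, List.sum_append]
  ring

-- range(0, b, w) with 0 ≤ b and w < 0 is empty
lemma pvRange_neg_empty (b w : Int) (hb : 0 ≤ b) (hw : w < 0) :
    PySem.List.pyRange 0 b w = [] := by
  simp only [PySem.List.pyRange]
  have h0 : ¬ w = 0 := by omega
  have h1 : ¬ 0 < w := by omega
  have h2 : ¬ b < 0 := by omega
  simp [h0, h1, h2]

-- ===== VERDICT (by name: the statement is the Claim_ definition above) =====
theorem find_ori_spec : Claim_equal_find_ori := by
  intro sequence window _ hpre
  unfold Spec_find_ori
  simp only [find_ori, find_ori_alt]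
  have hfold :
      (PySem.List.pyRange 0 ((sequence.toList.length : Int) - window) window).foldl
        (fun (st : Option Int × Int) i =>
          match st.1 with
          | none => (some (((PySem.List.slice sequence.toList (some i) (some (i + window))).count 'G' : Int)
              - ((PySem.List.slice sequence.toList (some i) (some (i + window))).count 'C' : Int)), i)
          | some m =>
            if m < ((PySem.List.slice sequence.toList (some i) (some (i + window))).count 'G' : Int)
                - ((PySem.List.slice sequence.toList (some i) (some (i + window))).count 'C' : Int) then
              (some (((PySem.List.slice sequence.toList (some i) (some (i + window))).count 'G' : Int)
                - ((PySem.List.slice sequence.toList (some i) (some (i + window))).count 'C' : Int)), i)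
            else st)
        (none, 0)
      = (PySem.List.pyRange 0 ((sequence.toList.length : Int) - window) window).foldl
        (fun (st : Option Int × Int) i =>
          if (match st.1 with
              | none => true
              | some m => decide (m <
                  PySem.List.pyGetD
                    (sequence.toList.foldl (fun (P : List Int) ch =>
                      P ++ [PySem.List.pyGetD P (-1) 0 + pvF ch]) [0]) (i + window) 0
                  - PySem.List.pyGetD
                    (sequence.toList.foldl (fun (P : List Int) ch =>
                      P ++ [PySem.List.pyGetD P (-1) 0 + pvF ch]) [0]) i 0)) then
            (some (PySem.List.pyGetD
                    (sequence.toList.foldl (fun (P : List Int) ch =>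
                      P ++ [PySem.List.pyGetD P (-1) 0 + pvF ch]) [0]) (i + window) 0
                  - PySem.List.pyGetD
                    (sequence.toList.foldl (fun (P : List Int) ch =>
                      P ++ [PySem.List.pyGetD P (-1) 0 + pvF ch]) [0]) i 0), i)
          else st)
        (none, 0) := by
    rcases lt_or_gt_of_ne hpre with hneg | hpos
    · rw [pvRange_neg_empty _ _ (by omega) hneg]
      rfl
    · apply PySem.List.foldl_congr_mem
      intro acc i hi
      rw [PySem.List.mem_pyRange_iff_of_pos hpos] at hi
      have hskew := pvSkew_eq sequence.toList window i hi.1 hpos (by omega)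
      simp only [hskew]
      cases acc.1 with
      | none => simp
      | some m =>
        by_cases hlt : m < ((PySem.List.slice sequence.toList (some i) (some (i + window))).count 'G' : Int)
            - ((PySem.List.slice sequence.toList (some i) (some (i + window))).count 'C' : Int)
        · simp [hlt]
        · simp [hlt]
  simp only [pvF] at hfold
  rw [hfold]
  rfl
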